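-- pv_equiv track=rewrite | github.com/mtyszler/advent-of-code-2024 | src/functions_day_05.py | assess_instructions
-- ===== SOURCE A (Python) =====
-- def assess_instructions(instructions: list[list], ordering: dict) -> [list, list]:
--     corr = []
--     incorr = []
--     for instruction in instructions:
--         correct_order = True
--         for i in range(len(instruction)):
--             cur = instruction[i]
--             before = instruction[0:i]
--             after = instruction[i + 1:]
--
--             if any([b not in ordering[cur]['before'] for b in before]):
--                 correct_order = False
--                 break
--             if any([a not in ordering[cur]['after'] for a in after]):
--                 correct_order = False
--                 break
--
--         if correct_order:
--             corr.append(instruction)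
--         else:
--             incorr.append(instruction)
--
--     return corr, incorr
-- ===== SOURCE B (Python) =====
-- def _in_order(instruction, ordering):
--     rest = instruction
--     while rest:
--         x, rest = rest[0], rest[1:]
--         if not all(y in ordering[x]['after'] and x in ordering[y]['before'] for y in rest):
--             return False
--     return True
--
--
-- def assess_instructions(instructions: list[list], ordering: dict) -> [list, list]:
--     corr = [ins for ins in instructions if _in_order(ins, ordering)]
--     incorr = [ins for ins in instructions if not _in_order(ins, ordering)]
--     return corr, incorr
-- ===== Notes on version B (the rewrite author's own statement) =====
-- stated objective: simpler
-- what changed: Per-position before/after slice checks are replaced by a single head-vs-tail pairwise scan (each page checked once against the pages after it), and the classify loop becomes two filters.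
-- outside the precondition, e.g. on assess_instructions([[1, 2]], {1: {'before': [], 'after': []}}): A returns ([], [[1, 2]]), B returns ([], [[1, 2]])
import Mathlib
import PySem

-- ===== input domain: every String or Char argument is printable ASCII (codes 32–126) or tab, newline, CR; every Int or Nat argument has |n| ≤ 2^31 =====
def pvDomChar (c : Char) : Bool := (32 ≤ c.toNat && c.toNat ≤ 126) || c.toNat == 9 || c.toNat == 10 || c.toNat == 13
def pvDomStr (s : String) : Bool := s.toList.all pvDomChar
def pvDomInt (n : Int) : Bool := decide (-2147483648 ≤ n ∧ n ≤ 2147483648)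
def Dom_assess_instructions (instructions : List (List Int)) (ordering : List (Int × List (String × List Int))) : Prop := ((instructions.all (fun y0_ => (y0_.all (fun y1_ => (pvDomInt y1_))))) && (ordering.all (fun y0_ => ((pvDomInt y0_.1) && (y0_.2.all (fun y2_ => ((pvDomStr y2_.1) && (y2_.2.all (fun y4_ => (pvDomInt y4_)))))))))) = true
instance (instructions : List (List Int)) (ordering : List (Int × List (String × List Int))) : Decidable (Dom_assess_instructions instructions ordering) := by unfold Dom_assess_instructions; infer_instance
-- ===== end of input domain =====

-- B replaces A's per-position before/after slice checks by a head-vs-tail pairwise scan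
-- and classifies with two filters: simpler to read, same cost, same value wherever A returns.


-- ===== PORT A =====
-- ordering[p][k]: two dict lookups; inside Pre_ both succeed, so the .getD [] defaults are never taken.
def pvLook (ordering : List (Int × List (String × List Int))) (k : String) (p : Int) : List Int :=
  (PySem.Dict.get? (PySem.Dict.mk ((PySem.Dict.get? (PySem.Dict.mk ordering) p).getD [])) k).getD []

-- A's inner loop over i: `before` is the processed prefix (= instruction[0:i]), `rest` the
-- remaining suffix whose head is `cur` (so `after` = instruction[i+1:]); a failed any() breaks with false.
def pvACheck (ordering : List (Int × List (String × List Int))) :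
    List Int → List Int → Bool
  | _, [] => true
  | before, cur :: after =>
    if before.any (fun b => !((pvLook ordering "before" cur).contains b)) then false
    else if after.any (fun a => !((pvLook ordering "after" cur).contains a)) then false
    else pvACheck ordering (before ++ [cur]) after
def assess_instructions (instructions : List (List Int)) (ordering : List (Int × List (String × List Int))) : List (List Int) × List (List Int) :=
  instructions.foldl
    (fun (acc : List (List Int) × List (List Int)) instruction =>
      if pvACheck ordering [] instruction then (acc.1 ++ [instruction], acc.2)
      else (acc.1, acc.2 ++ [instruction]))
    ([], [])

-- ===== PORT B =====
def pvInOrder (ordering : List (Int × List (String × List Int))) : List Int → Bool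
  | [] => true
  | x :: rest =>
    if rest.all (fun y => (pvLook ordering "after" x).contains y && (pvLook ordering "before" y).contains x) then
      pvInOrder ordering rest
    else false

def assess_instructions_alt (instructions : List (List Int)) (ordering : List (Int × List (String × List Int))) : List (List Int) × List (List Int) :=
  (instructions.filter (fun ins => pvInOrder ordering ins),
   instructions.filter (fun ins => !(pvInOrder ordering ins)))

-- ===== PRECONDITION & SPEC =====
def pvEntryOk (ordering : List (Int × List (String × List Int))) (p : Int) : Bool :=
  match PySem.Dict.get? (PySem.Dict.mk ordering) p with
  | none => false
  | some e => (PySem.Dict.get? (PySem.Dict.mk e) "before").isSome && (PySem.Dict.get? (PySem.Dict.mk e) "after").isSome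

-- Pre_ excludes inputs where a page of a multi-page instruction lacks a complete ordering entry:
-- there Python A (and B) raises KeyError — except on the accidental corner where an earlier
-- ordering violation breaks A's scan before the missing entry is reached (see the cites; B returns
-- the same pair there).  Instructions of length ≤ 1 never consult the dict, so they are unrestricted.
def Pre_assess_instructions (instructions : List (List Int)) (ordering : List (Int × List (String × List Int))) : Prop :=
  ∀ ins ∈ instructions, 2 ≤ ins.length → ∀ p ∈ ins, pvEntryOk ordering p = true
instance (instructions : List (List Int)) (ordering : List (Int × List (String × List Int))) : Decidable (Pre_assess_instructions instructions ordering) := by unfold Pre_assess_instructions; infer_instance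

def pvWitness_assess_instructions : List (List Int) × (List (Int × List (String × List Int))) :=
  ([[1, 2], [2, 1]],
   [(1, [("before", []), ("after", [2])]), (2, [("before", [1]), ("after", [])])])

def Spec_assess_instructions (instructions : List (List Int)) (ordering : List (Int × List (String × List Int))) (out : List (List Int) × List (List Int)) : Prop := out = assess_instructions_alt instructions ordering
instance (instructions : List (List Int)) (ordering : List (Int × List (String × List Int))) (out : List (List Int) × List (List Int)) : Decidable (Spec_assess_instructions instructions ordering out) := by unfold Spec_assess_instructions; infer_instance

-- ===== CLAIM (what is proved, stated in full; the proofs are below) =====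
def Claim_equal_assess_instructions : Prop := ∀ (instructions : List (List Int)) (ordering : List (Int × List (String × List Int))), Dom_assess_instructions instructions ordering → Pre_assess_instructions instructions ordering → Spec_assess_instructions instructions ordering (assess_instructions instructions ordering)

-- ===== LEMMAS AND PROOFS =====

-- The pairwise fact both programs decide, for x occurring before y.
def pvRel (ordering : List (Int × List (String × List Int))) (x y : Int) : Prop :=
  x ∈ pvLook ordering "before" y ∧ y ∈ pvLook ordering "after" x

lemma pvACheck_iff (ordering : List (Int × List (String × List Int))) :
    ∀ (rest before : List Int),
      pvACheck ordering before rest = true ↔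
        ((∀ b ∈ before, ∀ c ∈ rest, b ∈ pvLook ordering "before" c) ∧
         List.Pairwise (pvRel ordering) rest) := by
  intro rest
  induction rest with
  | nil => intro before; simp [pvACheck]
  | cons cur after ih =>
    intro before
    rw [pvACheck]
    split_ifs with h1 h2
    · simp only [List.any_eq_true, Bool.not_eq_true', List.contains_eq_mem, decide_eq_false_iff_not] at h1
      obtain ⟨b, hb, hnb⟩ := h1
      constructor
      · intro h; cases h
      · rintro ⟨hall, -⟩
        exact absurd (hall b hb cur List.mem_cons_self) hnb
    · simp only [List.any_eq_true, Bool.not_eq_true', List.contains_eq_mem, decide_eq_false_iff_not] at h2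
      obtain ⟨a, ha, hna⟩ := h2
      constructor
      · intro h; cases h
      · rintro ⟨-, hpw⟩
        rw [List.pairwise_cons] at hpw
        exact absurd (hpw.1 a ha).2 hna
    · simp only [List.any_eq_true, Bool.not_eq_true', List.contains_eq_mem,
        decide_eq_false_iff_not, not_exists, not_and, not_not] at h1 h2
      rw [ih, List.pairwise_cons]
      constructor
      · rintro ⟨hprev, hpw⟩
        refine ⟨?_, fun y hy => ⟨hprev cur (by simp) y hy, h2 y hy⟩, hpw⟩
        intro b hb c hc
        rcases List.mem_cons.mp hc with rfl | hc
        · exact h1 b hb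
        · exact hprev b (List.mem_append_left _ hb) c hc
      · rintro ⟨hall, hcur, hpw⟩
        refine ⟨?_, hpw⟩
        intro b hb c hc
        rcases List.mem_append.mp hb with hb | hb
        · exact hall b hb c (List.mem_cons_of_mem _ hc)
        · simp only [List.mem_singleton] at hb; subst hb
          exact (hcur c hc).1

lemma pvInOrder_iff (ordering : List (Int × List (String × List Int))) :
    ∀ (l : List Int), pvInOrder ordering l = true ↔ List.Pairwise (pvRel ordering) l := by
  intro l
  induction l with
  | nil => simp [pvInOrder]
  | cons x rest ih =>
    rw [pvInOrder, List.pairwise_cons]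
    split_ifs with h
    · simp only [List.all_eq_true, Bool.and_eq_true, List.contains_eq_mem, decide_eq_true_eq] at h
      rw [ih]
      constructor
      · intro hpw
        exact ⟨fun y hy => ⟨(h y hy).2, (h y hy).1⟩, hpw⟩
      · rintro ⟨-, hpw⟩; exact hpw
    · constructor
      · intro hf; cases hf
      · rintro ⟨hall, -⟩
        refine absurd ?_ h
        rw [List.all_eq_true]
        intro y hy
        simp [List.contains_eq_mem, (hall y hy).1, (hall y hy).2]

lemma pvACheck_eq_pvInOrder (ordering : List (Int × List (String × List Int))) (l : List Int) :
    pvACheck ordering [] l = pvInOrder ordering l := by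
  have h1 := pvACheck_iff ordering l []
  have h2 := pvInOrder_iff ordering l
  simp only [List.not_mem_nil, false_implies, implies_true, true_and] at h1
  cases ha : pvACheck ordering [] l <;> cases hb : pvInOrder ordering l
  · rfl
  · exact absurd (h1.mpr (h2.mp hb)) (by simp [ha])
  · exact absurd (h2.mpr (h1.mp ha)) (by simp [hb])
  · rfl

lemma pvFoldl_partition (ordering : List (Int × List (String × List Int))) :
    ∀ (l : List (List Int)) (acc : List (List Int) × List (List Int)),
      l.foldl
        (fun (acc : List (List Int) × List (List Int)) instruction =>
          if pvACheck ordering [] instruction then (acc.1 ++ [instruction], acc.2)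
          else (acc.1, acc.2 ++ [instruction])) acc
      = (acc.1 ++ l.filter (fun ins => pvInOrder ordering ins),
         acc.2 ++ l.filter (fun ins => !(pvInOrder ordering ins))) := by
  intro l
  induction l with
  | nil => intro acc; simp
  | cons ins rest ih =>
    intro acc
    rw [List.foldl_cons, ih, pvACheck_eq_pvInOrder]
    cases h : pvInOrder ordering ins <;> simp [h]

-- ===== VERDICT (by name: the statement is the Claim_ definition above) =====
theorem assess_instructions_spec : Claim_equal_assess_instructions := by
  intro instructions ordering _ _
  unfold Spec_assess_instructions assess_instructions assess_instructions_alt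
  rw [pvFoldl_partition]
  simp
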